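-- pv_equiv track=rewrite | github.com/realknightofni/alphabot | alphabot/matchparse/genres.py | get_level_from_exp
-- ===== SOURCE A (Python) =====
-- GENRE_TIERS = {1: 4,
--                2: 12,
--                3: 24,
--                4: 40
--                }
--
-- def get_level_from_exp(exp):
--     """Return the expected level (0-4) given the experience # (0-40+)."""
--     if exp == -1 or exp == None:
--         return None
--     if exp < 0:
--         return 0
--     for level, min_exp in sorted(GENRE_TIERS.items(), reverse=True):
--         if exp >= min_exp:
--             return level
--     return 0
-- ===== SOURCE B (Python) =====
-- import bisect
--
-- _THRESHOLDS = [4, 12, 24, 40]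
--
-- def get_level_from_exp(exp):
--     """Return the expected level (0-4) given the experience # (0-40+)."""
--     if exp == -1 or exp is None:
--         return None
--     return bisect.bisect_right(_THRESHOLDS, exp)
-- ===== Notes on version B (the rewrite author's own statement) =====
-- stated objective: idiomatic
-- what changed: Replaces the reverse linear scan over the sorted dict items with a single binary-search index lookup (bisect_right) on a precomputed ascending threshold table.
import Mathlib
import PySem

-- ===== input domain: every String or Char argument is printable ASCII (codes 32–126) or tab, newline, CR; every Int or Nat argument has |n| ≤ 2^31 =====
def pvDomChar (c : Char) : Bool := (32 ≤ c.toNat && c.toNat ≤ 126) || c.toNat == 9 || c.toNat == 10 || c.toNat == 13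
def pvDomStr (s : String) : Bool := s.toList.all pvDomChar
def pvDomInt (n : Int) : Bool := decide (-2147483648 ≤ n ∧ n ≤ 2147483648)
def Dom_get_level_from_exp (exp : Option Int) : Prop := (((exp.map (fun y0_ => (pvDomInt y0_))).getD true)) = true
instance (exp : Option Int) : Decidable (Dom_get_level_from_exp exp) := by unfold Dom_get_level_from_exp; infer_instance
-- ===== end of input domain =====

-- B replaces the reverse linear scan with a bisect_right lookup on an ascending threshold table (idiomatic).
-- ===== PORT A =====
-- GENRE_TIERS = {1:4, 2:12, 3:24, 4:40}; sorted(items, reverse=True) = [(4,40),(3,24),(2,12),(1,4)]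
def pvTiersDesc : List (Int × Int) := [(4, 40), (3, 24), (2, 12), (1, 4)]

-- the for-loop with early return: first (level, min_exp) with exp ≥ min_exp, else 0
def pvScan (e : Int) : List (Int × Int) → Int
  | [] => 0
  | (level, min_exp) :: rest => if e ≥ min_exp then level else pvScan e rest

def get_level_from_exp (exp : Option Int) : Option Int :=
  if exp = some (-1) ∨ exp = none then none
  else match exp with
    | none => none  -- unreachable (handled above)
    | some e => if e < 0 then some 0 else some (pvScan e pvTiersDesc)

-- ===== PORT B =====
def pvThresholds : List Int := [4, 12, 24, 40]

-- bisect.bisect_right on a sorted list = number of elements ≤ e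
def get_level_from_exp_alt (exp : Option Int) : Option Int :=
  match exp with
  | none => none
  | some e => if e = -1 then none
              else some ((pvThresholds.countP (fun t => decide (t ≤ e)) : Int))

-- ===== PRECONDITION & SPEC =====
def Spec_get_level_from_exp (exp : Option Int) (out : Option Int) : Prop := out = get_level_from_exp_alt exp
instance (exp : Option Int) (out : Option Int) : Decidable (Spec_get_level_from_exp exp out) := by unfold Spec_get_level_from_exp; infer_instance

-- ===== CLAIM (what is proved, stated in full; the proofs are below) =====
def Claim_equal_get_level_from_exp : Prop := ∀ (exp : Option Int), Dom_get_level_from_exp exp → Spec_get_level_from_exp exp (get_level_from_exp exp)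

-- ===== LEMMAS AND PROOFS =====

-- ===== VERDICT (by name: the statement is the Claim_ definition above) =====
theorem get_level_from_exp_spec : Claim_equal_get_level_from_exp := by
  intro exp _
  unfold Spec_get_level_from_exp get_level_from_exp get_level_from_exp_alt
  cases exp with
  | none => simp
  | some e =>
    by_cases h1 : e = -1
    · simp [h1]
    · simp only [pvScan, pvTiersDesc, pvThresholds, List.countP_cons, List.countP_nil,
        decide_eq_true_eq, Option.some.injEq, reduceCtorEq, or_false, h1, if_neg,
        if_false, not_false_eq_true]
      split_ifs <;> simp <;> omega
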